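-- pv_equiv track=rewrite | github.com/Joshuashen022/nebula-crawler-analysis | src/analysis/peer_uptime_protocol.py | count_reliable_peers_by_protocol
-- ===== SOURCE A (Python) =====
-- from collections import defaultdict
--
-- def count_reliable_peers_by_protocol(reliable_peers, protocol_rows):
--     """
--     Match reliable peers to protocols and count reliable peers per protocol.
--     protocol_rows: list of (protocol, multi_hash).
--     """
--     reliable_ids = {multi_hash for multi_hash, _percentage in reliable_peers}
--
--     # Build mapping multi_hash -> set of protocols (peers can speak multiple protocols).
--     mh_to_protocols: dict[str, set[str]] = defaultdict(set)
--     for protocol, multi_hash in protocol_rows: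
--         if not multi_hash or not protocol:
--             continue
--         mh_to_protocols[multi_hash].add(protocol)
--
--     protocol_counts = defaultdict(int)
--     for mh in reliable_ids:
--         for protocol in mh_to_protocols.get(mh, []):
--             protocol_counts[protocol] += 1
--
--     # Return a plain dict sorted by count desc, then protocol string
--     return dict(sorted(protocol_counts.items(), key=lambda x: (-x[1], x[0])))
-- ===== SOURCE B (Python) =====
-- def count_reliable_peers_by_protocol(reliable_peers, protocol_rows):
--     """
--     Match reliable peers to protocols and count reliable peers per protocol.
--     Flat list pipeline: dedup the filtered (protocol, multi_hash) pairs once,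
--     then count pairs per distinct protocol; no nested dict-of-sets.
--     """
--     reliable = {multi_hash for multi_hash, _percentage in reliable_peers}
--
--     seen = set()
--     pairs = []
--     for protocol, multi_hash in protocol_rows:
--         if protocol and multi_hash and multi_hash in reliable and (protocol, multi_hash) not in seen:
--             seen.add((protocol, multi_hash))
--             pairs.append((protocol, multi_hash))
--
--     protocols = []
--     for protocol, _mh in pairs:
--         if protocol not in protocols:
--             protocols.append(protocol)
--
--     counts = [(p, sum(1 for q, _mh in pairs if q == p)) for p in protocols]
--     return dict(sorted(counts, key=lambda x: (-x[1], x[0])))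
-- ===== Notes on version B (the rewrite author's own statement) =====
-- stated objective: alternative
-- what changed: Replaces A's dict-of-sets build (mh->set(protocols)) plus a join loop over the reliable set by a flat list pipeline: one pass dedups the filtered reliable (protocol, multi_hash) pairs into a list, a second pass collects distinct protocols in order, and each count is a countP over the deduped pair list; no nested dict/set aggregation.
import Mathlib
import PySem

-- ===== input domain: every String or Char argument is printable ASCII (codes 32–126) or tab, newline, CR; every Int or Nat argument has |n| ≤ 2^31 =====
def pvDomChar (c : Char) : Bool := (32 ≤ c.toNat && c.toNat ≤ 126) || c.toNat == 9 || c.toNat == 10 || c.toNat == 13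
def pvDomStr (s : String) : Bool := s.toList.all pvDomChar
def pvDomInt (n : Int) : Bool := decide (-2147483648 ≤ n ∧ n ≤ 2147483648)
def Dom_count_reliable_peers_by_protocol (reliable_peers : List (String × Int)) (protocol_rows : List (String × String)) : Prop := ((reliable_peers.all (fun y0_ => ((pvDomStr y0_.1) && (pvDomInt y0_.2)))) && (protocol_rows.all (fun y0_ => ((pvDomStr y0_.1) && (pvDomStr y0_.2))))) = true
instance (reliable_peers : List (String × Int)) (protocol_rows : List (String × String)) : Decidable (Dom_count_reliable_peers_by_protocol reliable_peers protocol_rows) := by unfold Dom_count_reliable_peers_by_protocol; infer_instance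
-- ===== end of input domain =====

-- B replaces A's dict-of-sets aggregation (mh -> set of protocols, then a join over the reliable
-- set) by a flat list pipeline: dedup the filtered reliable (protocol, mh) pairs once, then count
-- pairs per distinct protocol (objective: alternative).

-- ===== PORT A =====
def count_reliable_peers_by_protocol (reliable_peers : List (String × Int)) (protocol_rows : List (String × String)) : List (String × Int) :=
  let reliable_ids : PySem.Set String := PySem.Set.ofList (reliable_peers.map (fun pr => pr.1))
  let mh_to_protocols : PySem.Dict String (PySem.Set String) :=
    protocol_rows.foldl (fun d row =>
      if row.2 = "" ∨ row.1 = "" then d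
      else d.modify row.2 [] (fun s : PySem.Set String => s.add row.1)) PySem.Dict.empty
  let protocol_counts : PySem.Dict String Int :=
    reliable_ids.foldl (fun d mh =>
      (mh_to_protocols.getD mh []).foldl (fun d protocol => d.modify protocol 0 (· + 1)) d) PySem.Dict.empty
  PySem.List.sorted2 protocol_counts.items (fun x => -x.2) (fun x => x.1)

-- ===== PORT B =====
def count_reliable_peers_by_protocol_alt (reliable_peers : List (String × Int)) (protocol_rows : List (String × String)) : List (String × Int) :=
  let reliable : PySem.Set String := PySem.Set.ofList (reliable_peers.map (fun pr => pr.1))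
  let pairs : List (String × String) :=
    (protocol_rows.foldl
      (fun (st : PySem.Set (String × String) × List (String × String)) row =>
        if st.1.contains row = false ∧ reliable.contains row.2 = true ∧ row.1 ≠ "" ∧ row.2 ≠ ""
        then (st.1.add row, st.2 ++ [row]) else st)
      (PySem.Set.empty, [])).2
  let protocols : List String :=
    pairs.foldl (fun acc r => if acc.contains r.1 then acc else acc ++ [r.1]) []
  let counts : List (String × Int) :=
    protocols.map (fun p => (p, (pairs.countP (fun r => r.1 == p) : Int)))
  PySem.List.sorted2 counts (fun x => -x.2) (fun x => x.1)

-- ===== PRECONDITION & SPEC =====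
def Spec_count_reliable_peers_by_protocol (reliable_peers : List (String × Int)) (protocol_rows : List (String × String)) (out : List (String × Int)) : Prop := out = count_reliable_peers_by_protocol_alt reliable_peers protocol_rows
instance (reliable_peers : List (String × Int)) (protocol_rows : List (String × String)) (out : List (String × Int)) : Decidable (Spec_count_reliable_peers_by_protocol reliable_peers protocol_rows out) := by unfold Spec_count_reliable_peers_by_protocol; infer_instance

-- ===== CLAIM (what is proved, stated in full; the proofs are below) =====
def Claim_equal_count_reliable_peers_by_protocol : Prop := ∀ (reliable_peers : List (String × Int)) (protocol_rows : List (String × String)), Dom_count_reliable_peers_by_protocol reliable_peers protocol_rows → Spec_count_reliable_peers_by_protocol reliable_peers protocol_rows (count_reliable_peers_by_protocol reliable_peers protocol_rows)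

-- ===== LEMMAS AND PROOFS =====

-- proof-side abbreviations for the data both ports aggregate
def pvR (reliable_peers : List (String × Int)) : PySem.Set String :=
  PySem.Set.ofList (reliable_peers.map (fun pr => pr.1))
def pvV (protocol_rows : List (String × String)) : List (String × String) :=
  protocol_rows.filter (fun r => !decide (r.2 = "" ∨ r.1 = ""))
def pvW (reliable_peers : List (String × Int)) (protocol_rows : List (String × String)) : List (String × String) :=
  protocol_rows.filter (fun r => !decide (r.2 = "" ∨ r.1 = "") && (pvR reliable_peers).contains r.2)
def pvProtos (protocol_rows : List (String × String)) (mh : String) : PySem.Set String :=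
  PySem.Set.ofList (((pvV protocol_rows).filter (fun r => r.2 == mh)).map (fun r => r.1))
def pvP (reliable_peers : List (String × Int)) (protocol_rows : List (String × String)) : List String :=
  (pvR reliable_peers).flatMap (fun mh => pvProtos protocol_rows mh)
def pvPeers (reliable_peers : List (String × Int)) (protocol_rows : List (String × String)) (p : String) : PySem.Set String :=
  PySem.Set.ofList (((pvW reliable_peers protocol_rows).filter (fun r => r.1 == p)).map (fun r => r.2))
def pvPairs (reliable_peers : List (String × Int)) (protocol_rows : List (String × String)) : List (String × String) :=
  PySem.Set.ofList (pvW reliable_peers protocol_rows)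

-- the boolean comparator sorted2 uses for key (-count, protocol)
def pvCmp (a b : String × Int) : Bool :=
  decide ((-a.2) < (-b.2)) || (!decide ((-b.2) < (-a.2)) && decide (a.1 < b.1))

-- uniqueness: two sorted (pairwise, asymmetric relation) rearrangements of the same multiset coincide
lemma pv_eq_of_perm_of_pairwise {α : Type} (r : α → α → Prop)
    (asym : ∀ a b, r a b → r b a → False) :
    ∀ (l₁ l₂ : List α), l₁.Perm l₂ → l₁.Pairwise r → l₂.Pairwise r → l₁ = l₂ := by
  intro l₁
  induction l₁ with
  | nil => intro l₂ h _ _; exact h.nil_eq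
  | cons a t ih =>
    intro l₂ hp h1 h2
    cases l₂ with
    | nil => exact absurd hp.symm (by simp)
    | cons b t₂ =>
      rcases List.pairwise_cons.mp h1 with ⟨ha, ht⟩
      rcases List.pairwise_cons.mp h2 with ⟨hb, ht₂⟩
      by_cases hab : a = b
      · subst hab
        rw [ih t₂ hp.cons_inv ht ht₂]
      · have hamem : a ∈ b :: t₂ := hp.subset (List.mem_cons_self)
        have hbmem : b ∈ a :: t := hp.symm.subset (List.mem_cons_self)
        have hat₂ : a ∈ t₂ := by
          rcases List.mem_cons.mp hamem with h | h
          · exact absurd h hab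
          · exact h
        have hbt : b ∈ t := by
          rcases List.mem_cons.mp hbmem with h | h
          · exact absurd h.symm hab
          · exact h
        exact absurd (ha b hbt) (fun h => asym _ _ h (hb a hat₂))

lemma pv_insertBy_pairwise {α : Type} (lt : α → α → Bool)
    (asym : ∀ a b, lt a b = true → lt b a = false)
    (negtrans : ∀ a b c, lt a b = false → lt b c = false → lt a c = false) (x : α) :
    ∀ acc : List α, acc.Pairwise (fun a b => lt b a = false) →
      (PySem.List.insertBy lt x acc).Pairwise (fun a b => lt b a = false) := by
  intro acc
  induction acc with
  | nil => intro _; simp [PySem.List.insertBy]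
  | cons y ys ih =>
    intro h
    rcases List.pairwise_cons.mp h with ⟨hy, hys⟩
    by_cases hxy : lt x y = true
    · rw [PySem.List.insertBy, if_pos hxy]
      refine List.pairwise_cons.mpr ⟨?_, h⟩
      intro z hz
      rcases List.mem_cons.mp hz with rfl | hz'
      · exact asym _ _ hxy
      · exact negtrans _ _ _ (hy z hz') (asym _ _ hxy)
    · have hxy' : lt x y = false := by simpa using hxy
      rw [PySem.List.insertBy, if_neg (by simp [hxy'])]
      refine List.pairwise_cons.mpr ⟨?_, ih hys⟩
      intro z hz
      rcases (PySem.List.mem_insertBy lt x z ys).mp hz with rfl | hz'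
      · exact hxy'
      · exact hy z hz'

lemma pv_foldl_insertBy_pairwise {α : Type} (lt : α → α → Bool)
    (asym : ∀ a b, lt a b = true → lt b a = false)
    (negtrans : ∀ a b c, lt a b = false → lt b c = false → lt a c = false) :
    ∀ (xs acc : List α), acc.Pairwise (fun a b => lt b a = false) →
      (xs.foldl (fun acc x => PySem.List.insertBy lt x acc) acc).Pairwise (fun a b => lt b a = false) := by
  intro xs
  induction xs with
  | nil => intro acc h; exact h
  | cons x xs ih => intro acc h; exact ih _ (pv_insertBy_pairwise lt asym negtrans x acc h)

lemma pvCmp_asym (a b : String × Int) : pvCmp a b = true → pvCmp b a = false := by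
  unfold pvCmp
  simp only [Bool.or_eq_true, Bool.and_eq_true, Bool.not_eq_true', decide_eq_true_eq,
    Bool.or_eq_false_iff, Bool.and_eq_false_iff, Bool.not_eq_false', decide_eq_false_iff_not]
  rintro (h | ⟨h1, h2⟩)
  · constructor
    · omega
    · left; omega
  · constructor
    · omega
    · right; exact asymm h2

lemma pvCmp_negtrans (a b c : String × Int) :
    pvCmp a b = false → pvCmp b c = false → pvCmp a c = false := by
  unfold pvCmp
  simp only [Bool.or_eq_false_iff, Bool.and_eq_false_iff, Bool.not_eq_false', decide_eq_false_iff_not,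
    decide_eq_true_iff]
  rintro ⟨h1, h2⟩ ⟨h3, h4⟩
  constructor
  · omega
  · rcases h2 with h2 | h2
    · left; omega
    · rcases h4 with h4 | h4
      · left; omega
      · by_cases hbc : (-b.2 : Int) < -c.2
        · left; omega
        · right
          intro hac
          have hab : ¬ a.1 < b.1 := h2
          have hbcs : ¬ b.1 < c.1 := h4
          rcases lt_trichotomy a.1 b.1 with h | h | h
          · exact hab h
          · exact hbcs (h ▸ hac)
          · exact hbcs (lt_trans h hac)

-- sorted2 with key (-count, protocol) depends only on the multiset when the protocols are distinct
lemma pv_sorted2_congr (l₁ l₂ : List (String × Int)) (hperm : l₁.Perm l₂)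
    (hnd : (l₁.map Prod.fst).Nodup) :
    PySem.List.sorted2 l₁ (fun x => -x.2) (fun x => x.1)
      = PySem.List.sorted2 l₂ (fun x => -x.2) (fun x => x.1) := by
  have hs₁ : PySem.List.sorted2 l₁ (fun x => -x.2) (fun x => x.1)
      = l₁.foldl (fun acc x => PySem.List.insertBy pvCmp x acc) [] := rfl
  have hs₂ : PySem.List.sorted2 l₂ (fun x => -x.2) (fun x => x.1)
      = l₂.foldl (fun acc x => PySem.List.insertBy pvCmp x acc) [] := rfl
  have hp₁ : (PySem.List.sorted2 l₁ (fun x => -x.2) (fun x => x.1)).Perm l₁ :=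
    PySem.List.sorted2_perm ..
  have hp₂ : (PySem.List.sorted2 l₂ (fun x => -x.2) (fun x => x.1)).Perm l₂ :=
    PySem.List.sorted2_perm ..
  have hw₁ : (PySem.List.sorted2 l₁ (fun x => -x.2) (fun x => x.1)).Pairwise (fun a b => pvCmp b a = false) := by
    rw [hs₁]; exact pv_foldl_insertBy_pairwise pvCmp pvCmp_asym pvCmp_negtrans l₁ [] (by simp)
  have hw₂ : (PySem.List.sorted2 l₂ (fun x => -x.2) (fun x => x.1)).Pairwise (fun a b => pvCmp b a = false) := by
    rw [hs₂]; exact pv_foldl_insertBy_pairwise pvCmp pvCmp_asym pvCmp_negtrans l₂ [] (by simp)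
  have hnd₂ : (l₂.map Prod.fst).Nodup := ((hperm.map Prod.fst).nodup_iff).mp hnd
  have hne₁ : (PySem.List.sorted2 l₁ (fun x => -x.2) (fun x => x.1)).Pairwise (fun a b => a.1 ≠ b.1) :=
    List.pairwise_map.mp (((hp₁.map Prod.fst).nodup_iff).mpr hnd)
  have hne₂ : (PySem.List.sorted2 l₂ (fun x => -x.2) (fun x => x.1)).Pairwise (fun a b => a.1 ≠ b.1) :=
    List.pairwise_map.mp (((hp₂.map Prod.fst).nodup_iff).mpr hnd₂)
  have himp : ∀ a b : String × Int, (pvCmp b a = false ∧ a.1 ≠ b.1) →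
      ((-a.2 : Int) < -b.2 ∨ ((-a.2 : Int) = -b.2 ∧ a.1 < b.1)) := by
    intro a b ⟨hw, hne⟩
    revert hw
    unfold pvCmp
    simp only [Bool.or_eq_false_iff, Bool.and_eq_false_iff, Bool.not_eq_false', decide_eq_false_iff_not,
      decide_eq_true_iff]
    rintro ⟨h1, h2⟩
    rcases h2 with h2 | h2
    · left; omega
    · have he : (-a.2 : Int) = -b.2 ∨ (-a.2 : Int) < -b.2 := by omega
      rcases he with he | he
      · right
        refine ⟨he, ?_⟩
        rcases lt_trichotomy a.1 b.1 with h | h | h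
        · exact h
        · exact absurd h hne
        · exact absurd h h2
      · left; exact he
  have rasym : ∀ a b : String × Int,
      ((-a.2 : Int) < -b.2 ∨ ((-a.2 : Int) = -b.2 ∧ a.1 < b.1)) →
      ((-b.2 : Int) < -a.2 ∨ ((-b.2 : Int) = -a.2 ∧ b.1 < a.1)) → False := by
    rintro a b (h | ⟨h1, h2⟩) (h' | ⟨h1', h2'⟩)
    · omega
    · omega
    · omega
    · exact absurd h2' (asymm h2)
  exact pv_eq_of_perm_of_pairwise _ rasym _ _
    (hp₁.trans (hperm.trans hp₂.symm))
    ((hw₁.and hne₁).imp (himp _ _))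
    ((hw₂.and hne₂).imp (himp _ _))

-- grouping fold: the bucket of key c after a modify/add loop
lemma pv_getD_fold_group {β : Type} (k : β → String) (v : β → String) :
    ∀ (l : List β) (d : PySem.Dict String (PySem.Set String)) (c : String),
      (l.foldl (fun d x => d.modify (k x) [] (fun s : PySem.Set String => s.add (v x))) d).getD c []
        = ((l.filter (fun x => k x == c)).map v).foldl (fun s y => s.add y) (d.getD c []) := by
  intro l
  induction l with
  | nil => intro d c; rfl
  | cons x l ih =>
    intro d c
    by_cases hx : k x = c
    · subst hx
      simp only [List.foldl_cons, List.filter_cons, beq_self_eq_true, if_pos, List.map_cons]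
      rw [ih]
      rw [PySem.Dict.getD_modify_self]
    · simp only [List.foldl_cons, List.filter_cons]
      rw [if_neg (by simpa using hx)]
      rw [ih]
      rw [PySem.Dict.getD_modify_of_ne _ _ _ (fun h => hx h.symm)]

lemma pv_foldl_add_eq_ofList (M : List String) :
    M.foldl (fun s y => PySem.Set.add s y) ([] : PySem.Set String) = PySem.Set.ofList M := by
  have h := PySem.Set.update_map_eq_foldl_add M (fun y => y) ([] : PySem.Set String)
  rw [List.map_id'] at h
  rw [← h]
  exact PySem.Set.update_empty M

-- counting occurrences in a flatMap over nodup buckets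
lemma pv_count_flatMap (R : List String) (g : String → List String)
    (hg : ∀ mh, (g mh).Nodup) (p : String) :
    (R.flatMap g).count p = R.countP (fun mh => decide (p ∈ g mh)) := by
  induction R with
  | nil => rfl
  | cons mh R ih =>
    rw [List.flatMap_cons, List.count_append, List.countP_cons, ih]
    by_cases hp : p ∈ g mh
    · rw [List.count_eq_one_of_mem (hg mh) hp]
      simp [hp]
      omega
    · rw [List.count_eq_zero_of_not_mem hp]
      simp [hp]

-- A's result in closed form
lemma pv_lemA (reliable_peers : List (String × Int)) (protocol_rows : List (String × String)) :
    count_reliable_peers_by_protocol reliable_peers protocol_rows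
      = PySem.List.sorted2
          ((PySem.Set.ofList (pvP reliable_peers protocol_rows)).map
            (fun p => (p, (List.count p (pvP reliable_peers protocol_rows) : Int))))
          (fun x => -x.2) (fun x => x.1) := by
  unfold count_reliable_peers_by_protocol
  simp only []
  have hbuild : protocol_rows.foldl (fun d row =>
        if row.2 = "" ∨ row.1 = "" then d
        else d.modify row.2 [] (fun s : PySem.Set String => s.add row.1)) PySem.Dict.empty
      = (pvV protocol_rows).foldl (fun d row => d.modify row.2 [] (fun s : PySem.Set String => s.add row.1)) PySem.Dict.empty := by
    rw [pvV, List.foldl_filter]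
    congr 1
    funext d row
    by_cases h : row.2 = "" ∨ row.1 = "" <;> simp [h]
  have hgetD : ∀ mh, ((pvV protocol_rows).foldl (fun d row => d.modify row.2 [] (fun s : PySem.Set String => s.add row.1)) PySem.Dict.empty).getD mh []
      = pvProtos protocol_rows mh := by
    intro mh
    rw [pv_getD_fold_group (fun r : String × String => r.2) (fun r : String × String => r.1)]
    have : (PySem.Dict.empty : PySem.Dict String (PySem.Set String)).getD mh [] = [] := rfl
    rw [this, pv_foldl_add_eq_ofList, pvProtos]
  rw [hbuild]
  have houter : (PySem.Set.ofList (reliable_peers.map (fun pr => pr.1))).foldl (fun d mh =>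
        (((pvV protocol_rows).foldl (fun d row => d.modify row.2 [] (fun s : PySem.Set String => s.add row.1)) PySem.Dict.empty).getD mh []).foldl
          (fun d protocol => d.modify protocol 0 (· + 1)) d) PySem.Dict.empty
      = PySem.Dict.counter (pvP reliable_peers protocol_rows) := by
    have h1 : (fun (d : PySem.Dict String Int) mh =>
        (((pvV protocol_rows).foldl (fun d row => d.modify row.2 [] (fun s : PySem.Set String => s.add row.1)) PySem.Dict.empty).getD mh []).foldl
          (fun d protocol => d.modify protocol 0 (· + 1)) d)
        = (fun (d : PySem.Dict String Int) mh =>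
          (pvProtos protocol_rows mh).foldl (fun d protocol => d.modify protocol 0 (· + 1)) d) := by
      funext d mh
      rw [hgetD]
    rw [h1, pvP, pvR]
    rw [PySem.Dict.counter_eq_foldl, List.foldl_flatMap]
  rw [houter, PySem.Dict.items_counter]

-- B's dedup pass: the fold carries (seen set, pair list) with seen = list, and produces set(filtered rows)
lemma pv_pairs_fold (reliable : PySem.Set String) :
    ∀ (rows : List (String × String)) (l : PySem.Set (String × String)),
      (rows.foldl
        (fun (st : PySem.Set (String × String) × List (String × String)) row =>
          if st.1.contains row = false ∧ reliable.contains row.2 = true ∧ row.1 ≠ "" ∧ row.2 ≠ ""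
          then (st.1.add row, st.2 ++ [row]) else st)
        (l, l)).2
      = (rows.filter (fun r => !decide (r.2 = "" ∨ r.1 = "") && reliable.contains r.2)).foldl
          PySem.Set.add l := by
  intro rows
  induction rows with
  | nil => intro l; rfl
  | cons row rows ih =>
    intro l
    by_cases hg : reliable.contains row.2 = true ∧ row.1 ≠ "" ∧ row.2 ≠ ""
    · have hrel' : row.2 ∈ reliable := by simpa using hg.1
      have hfilt : (!decide (row.2 = "" ∨ row.1 = "") && reliable.contains row.2) = true := by
        simp [hg.2.1, hg.2.2, hrel']
      rw [List.filter_cons, if_pos hfilt, List.foldl_cons, List.foldl_cons]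
      by_cases hc : l.contains row = false
      · have hnm : row ∉ l := by simpa using hc
        rw [if_pos ⟨hc, hg⟩]
        have hadd : PySem.Set.add l row = l ++ [row] := by simp [PySem.Set.add, hnm]
        rw [← hadd, ih]
      · have hct : l.contains row = true := by
          revert hc; cases h : l.contains row <;> simp
        have hm : row ∈ l := by simpa using hct
        rw [if_neg (by rintro ⟨hfalse, _⟩; rw [hct] at hfalse; cases hfalse)]
        have hadd : PySem.Set.add l row = l := by simp [PySem.Set.add, hm]
        rw [hadd]
        exact ih l
    · have hfilt : (!decide (row.2 = "" ∨ row.1 = "") && reliable.contains row.2) = false := by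
        by_cases h2 : row.2 = ""
        · simp [h2]
        · by_cases h1 : row.1 = ""
          · simp [h1]
          · have hnm : row.2 ∉ reliable := fun hmem =>
              hg ⟨by simpa using hmem, h1, h2⟩
            simp [h1, h2, hnm]
      rw [List.filter_cons, if_neg (by simp only [hfilt]; exact Bool.false_ne_true), List.foldl_cons,
        if_neg (by rintro ⟨_, h⟩; exact hg h)]
      exact ih l

lemma pv_pairs (reliable_peers : List (String × Int)) (protocol_rows : List (String × String)) :
    (protocol_rows.foldl
      (fun (st : PySem.Set (String × String) × List (String × String)) row =>
        if st.1.contains row = false ∧ (pvR reliable_peers).contains row.2 = true ∧ row.1 ≠ "" ∧ row.2 ≠ ""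
        then (st.1.add row, st.2 ++ [row]) else st)
      (PySem.Set.empty, [])).2
    = pvPairs reliable_peers protocol_rows := by
  have h := pv_pairs_fold (pvR reliable_peers) protocol_rows ([] : PySem.Set (String × String))
  have he : (PySem.Set.empty : PySem.Set (String × String)) = ([] : PySem.Set (String × String)) := rfl
  rw [he, h]; rfl

-- B's distinct-protocols pass is set(pairs.map fst)
lemma pv_protocols (pairs : List (String × String)) :
    pairs.foldl (fun acc r => if acc.contains r.1 then acc else acc ++ [r.1]) []
      = PySem.Set.ofList (pairs.map (fun r => r.1)) := by
  rw [PySem.Set.ofList_eq_foldl, List.foldl_map]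
  rfl

-- B's result in closed form
lemma pv_lemB (reliable_peers : List (String × Int)) (protocol_rows : List (String × String)) :
    count_reliable_peers_by_protocol_alt reliable_peers protocol_rows
      = PySem.List.sorted2
          ((PySem.Set.ofList ((pvPairs reliable_peers protocol_rows).map (fun r => r.1))).map
            (fun p => (p, ((pvPairs reliable_peers protocol_rows).countP (fun r => r.1 == p) : Int))))
          (fun x => -x.2) (fun x => x.1) := by
  unfold count_reliable_peers_by_protocol_alt
  simp only []
  rw [show PySem.Set.ofList (reliable_peers.map (fun pr => pr.1)) = pvR reliable_peers from rfl]
  rw [pv_pairs, pv_protocols]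

-- the nodup pair list restricted to protocol p, projected to peers, is pvPeers p
lemma pv_countP_pairs (reliable_peers : List (String × Int)) (protocol_rows : List (String × String)) (p : String) :
    (pvPairs reliable_peers protocol_rows).countP (fun r => r.1 == p)
      = (pvPeers reliable_peers protocol_rows p).length := by
  rw [List.countP_eq_length_filter]
  have hndPairs : (pvPairs reliable_peers protocol_rows).Nodup := PySem.Set.nodup_ofList _
  have hndF : ((pvPairs reliable_peers protocol_rows).filter (fun r => r.1 == p)).Nodup :=
    hndPairs.filter _
  have hnd1 : (((pvPairs reliable_peers protocol_rows).filter (fun r => r.1 == p)).map (fun r => r.2)).Nodup := by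
    refine List.Nodup.map_on ?_ hndF
    intro x hx y hy hxy
    have hxp : x.1 = p := by simpa using (List.mem_filter.mp hx).2
    have hyp : y.1 = p := by simpa using (List.mem_filter.mp hy).2
    exact Prod.ext (hxp.trans hyp.symm) hxy
  have hnd2 : (pvPeers reliable_peers protocol_rows p).Nodup := PySem.Set.nodup_ofList _
  have hmem : ∀ mh, mh ∈ ((pvPairs reliable_peers protocol_rows).filter (fun r => r.1 == p)).map (fun r => r.2)
      ↔ mh ∈ pvPeers reliable_peers protocol_rows p := by
    intro mh
    simp only [pvPairs, pvPeers, List.mem_map, List.mem_filter, PySem.Set.mem_ofList, beq_iff_eq]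
  have hlen : (((pvPairs reliable_peers protocol_rows).filter (fun r => r.1 == p)).map (fun r => r.2)).length
      = (pvPeers reliable_peers protocol_rows p).length :=
    ((List.perm_ext_iff_of_nodup hnd1 hnd2).mpr hmem).length_eq
  rw [← hlen, List.length_map]

-- A's per-protocol multiplicity equals the size of the reliable peer set speaking p
lemma pv_lemCount (reliable_peers : List (String × Int)) (protocol_rows : List (String × String)) (p : String) :
    List.count p (pvP reliable_peers protocol_rows) = (pvPeers reliable_peers protocol_rows p).length := by
  rw [pvP, pv_count_flatMap (pvR reliable_peers) (fun mh => pvProtos protocol_rows mh)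
    (fun mh => PySem.Set.nodup_ofList _) p]
  rw [List.countP_eq_length_filter]
  have hnd1 : ((pvR reliable_peers).filter (fun mh => decide (p ∈ pvProtos protocol_rows mh))).Nodup :=
    (PySem.Set.nodup_ofList _).filter _
  have hnd2 : (pvPeers reliable_peers protocol_rows p).Nodup := PySem.Set.nodup_ofList _
  have hmem : ∀ mh, mh ∈ (pvR reliable_peers).filter (fun mh => decide (p ∈ pvProtos protocol_rows mh))
      ↔ mh ∈ pvPeers reliable_peers protocol_rows p := by
    intro mh
    simp only [List.mem_filter, decide_eq_true_eq, pvPeers, pvProtos, pvW, pvV, pvR,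
      PySem.Set.mem_ofList, List.mem_map, List.mem_filter, beq_iff_eq, Bool.and_eq_true,
      Bool.not_eq_true', decide_eq_false_iff_not, PySem.Set.contains_iff]
    constructor
    · rintro ⟨hmh, r, ⟨⟨hrmem, hguard⟩, hr2⟩, hr1⟩
      exact ⟨r, ⟨⟨hrmem, hguard, by rw [hr2]; exact hmh⟩, hr1⟩, hr2⟩
    · rintro ⟨r, ⟨⟨hrmem, hguard, hrel⟩, hr1⟩, hr2⟩
      exact ⟨by rw [← hr2]; exact hrel, r, ⟨⟨hrmem, hguard⟩, hr2⟩, hr1⟩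
  exact ((List.perm_ext_iff_of_nodup hnd1 hnd2).mpr hmem).length_eq

-- both ports aggregate the same key set
lemma pv_lemKeys (reliable_peers : List (String × Int)) (protocol_rows : List (String × String)) :
    (PySem.Set.ofList (pvP reliable_peers protocol_rows)).Perm
      (PySem.Set.ofList ((pvPairs reliable_peers protocol_rows).map (fun r => r.1))) := by
  refine (List.perm_ext_iff_of_nodup (PySem.Set.nodup_ofList _) (PySem.Set.nodup_ofList _)).mpr ?_
  intro p
  simp only [pvP, pvProtos, pvPairs, pvW, pvV, pvR, PySem.Set.mem_ofList, List.mem_flatMap,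
    List.mem_map, List.mem_filter, beq_iff_eq, Bool.and_eq_true, Bool.not_eq_true',
    decide_eq_false_iff_not, PySem.Set.contains_iff, PySem.Set.mem_ofList]
  constructor
  · rintro ⟨mh, hmh, r, ⟨⟨hrmem, hguard⟩, hr2⟩, hr1⟩
    exact ⟨r, ⟨hrmem, hguard, by rw [hr2]; exact hmh⟩, hr1⟩
  · rintro ⟨r, ⟨hrmem, hguard, hrel⟩, hr1⟩
    exact ⟨r.2, hrel, r, ⟨⟨hrmem, hguard⟩, rfl⟩, hr1⟩

-- ===== VERDICT (by name: the statement is the Claim_ definition above) =====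
theorem count_reliable_peers_by_protocol_spec : Claim_equal_count_reliable_peers_by_protocol := by
  intro reliable_peers protocol_rows _
  unfold Spec_count_reliable_peers_by_protocol
  rw [pv_lemA, pv_lemB]
  have hfun : (fun p => (p, (List.count p (pvP reliable_peers protocol_rows) : Int)))
      = (fun p => (p, ((pvPairs reliable_peers protocol_rows).countP (fun r => r.1 == p) : Int))) := by
    funext p
    rw [pv_lemCount, pv_countP_pairs]
  apply pv_sorted2_congr
  · rw [hfun]
    exact (pv_lemKeys reliable_peers protocol_rows).map _
  · rw [List.map_map]
    have : (Prod.fst ∘ fun p => (p, (List.count p (pvP reliable_peers protocol_rows) : Int)))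
        = fun p => p := rfl
    rw [this, List.map_id']
    exact PySem.Set.nodup_ofList _
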